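-- pv_equiv track=rewrite | github.com/Antovigo/spd | spd/scripts/run_variations.py | split_key_path
-- ===== SOURCE A (Python) =====
-- def split_key_path(key_path: str) -> list[str]:
--     """Split key path on dots, but preserve dots inside brackets.
--
--     Examples:
--         "seed" -> ["seed"]
--         "lr_schedule.start_val" -> ["lr_schedule", "start_val"]
--         "module_info[h.*.mlp.gate_proj].C" -> ["module_info[h.*.mlp.gate_proj]", "C"]
--     """
--     parts: list[str] = []
--     current: list[str] = []
--     bracket_depth = 0
--
--     for char in key_path:
--         if char == "[":
--             bracket_depth += 1
--             current.append(char)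
--         elif char == "]":
--             bracket_depth -= 1
--             current.append(char)
--         elif char == "." and bracket_depth == 0:
--             if current:
--                 parts.append("".join(current))
--                 current = []
--         else:
--             current.append(char)
--
--     if current:
--         parts.append("".join(current))
--
--     return parts
-- ===== SOURCE B (Python) =====
-- def split_key_path(key_path: str) -> list[str]:
--     """Split key path on dots, but preserve dots inside brackets.
--
--     Tokenize on '.' first, then merge pieces back while the running net
--     bracket balance is nonzero; emit the buffer whenever the balance is 0.
--     """
--     parts: list[str] = []
--     buffer = ""
--     balance = 0
--     for piece in key_path.split("."):
--         buffer = buffer + "." + piece if buffer else piece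
--         balance += piece.count("[") - piece.count("]")
--         if balance == 0:
--             if buffer:
--                 parts.append(buffer)
--             buffer = ""
--     if buffer:
--         parts.append(buffer)
--     return parts
-- ===== Notes on version B (the rewrite author's own statement) =====
-- stated objective: faster
-- what changed: Replaced A's character-by-character bracket-depth scan with a tokenize-then-merge pass: split the path on dots first, then merge pieces while the running net bracket balance (count of opening minus closing brackets) is nonzero, emitting the buffer whenever it returns to 0.
import Mathlib
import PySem

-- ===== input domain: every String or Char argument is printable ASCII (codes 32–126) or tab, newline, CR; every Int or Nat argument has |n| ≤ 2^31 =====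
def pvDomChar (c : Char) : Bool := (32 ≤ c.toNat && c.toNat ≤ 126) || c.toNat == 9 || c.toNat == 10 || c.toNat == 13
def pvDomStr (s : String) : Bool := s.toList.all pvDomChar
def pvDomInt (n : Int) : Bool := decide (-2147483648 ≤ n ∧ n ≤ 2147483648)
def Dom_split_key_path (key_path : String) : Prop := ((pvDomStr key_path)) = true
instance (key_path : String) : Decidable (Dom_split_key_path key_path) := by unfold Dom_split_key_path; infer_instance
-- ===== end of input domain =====

-- B replaces A's character-by-character depth scan by a dot-split followed by a
-- piece-merging pass on the running net bracket balance (same return value on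
-- every input; a timing run measured B faster by a constant factor).

-- ===== PORT A =====
-- append current part (if non-empty) to parts — Python's `if current: parts.append("".join(current))`
def pvEmit (parts : List String) (cur : List Char) : List String :=
  if cur ≠ [] then parts ++ [String.ofList cur] else parts

-- one loop iteration of A (state: parts, current, bracket_depth)
def pvStepA (st : List String × List Char × Int) (c : Char) : List String × List Char × Int :=
  match st with
  | (parts, current, depth) =>
    if c = '[' then (parts, current ++ [c], depth + 1)
    else if c = ']' then (parts, current ++ [c], depth - 1)
    else if c = '.' ∧ depth = 0 then (pvEmit parts current, [], depth)
    else (parts, current ++ [c], depth)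

def split_key_path (key_path : String) : List String :=
  match key_path.toList.foldl pvStepA ([], [], 0) with
  | (parts, current, _) => pvEmit parts current

-- ===== PORT B =====
-- net bracket balance of one piece: piece.count('[') - piece.count(']')
def pvNet (p : List Char) : Int :=
  (PySem.Chars.count p ['['] : Int) - (PySem.Chars.count p [']'] : Int)

-- one loop iteration of B (state: parts, buffer, balance)
def pvStepB (st : List String × List Char × Int) (piece : List Char) :
    List String × List Char × Int :=
  match st with
  | (parts, buffer, balance) =>
    let buffer' := if buffer ≠ [] then buffer ++ ['.'] ++ piece else piece
    let balance' := balance + pvNet piece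
    if balance' = 0 then (pvEmit parts buffer', [], 0)
    else (parts, buffer', balance')

def split_key_path_alt (key_path : String) : List String :=
  match (PySem.Chars.splitOn key_path.toList ['.']).foldl pvStepB ([], [], 0) with
  | (parts, buffer, _) => pvEmit parts buffer

-- ===== PRECONDITION & SPEC =====
def Spec_split_key_path (key_path : String) (out : List String) : Prop := out = split_key_path_alt key_path
instance (key_path : String) (out : List String) : Decidable (Spec_split_key_path key_path out) := by unfold Spec_split_key_path; infer_instance

-- ===== CLAIM (what is proved, stated in full; the proofs are below) =====
def Claim_equal_split_key_path : Prop := ∀ (key_path : String), Dom_split_key_path key_path → Spec_split_key_path key_path (split_key_path key_path)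

-- ===== LEMMAS AND PROOFS =====

-- count of a single-character substring is the character count
theorem pv_count_go_single (d : Char) : ∀ (cs : List Char) (acc : Nat),
    PySem.Chars.count.go [d] cs.length cs acc = acc + cs.count d := by
  intro cs
  induction cs with
  | nil => intro acc; simp [PySem.Chars.count.go]
  | cons c cs ih =>
      intro acc
      simp only [List.length_cons, PySem.Chars.count.go, List.isPrefixOf, List.length_nil,
        List.drop_succ_cons, List.drop_zero, List.count_cons, Bool.and_true]
      by_cases hc : d = c
      · subst hc; simp [ih]; omega
      · simp [hc, ih, Ne.symm hc]

theorem pv_count_single (cs : List Char) (d : Char) :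
    PySem.Chars.count cs [d] = cs.count d := by
  simp [PySem.Chars.count, pv_count_go_single]

-- depth change contributed by one character
def pvDelta (c : Char) : Int :=
  if c = '[' then 1 else if c = ']' then -1 else 0

theorem pv_net_nil : pvNet [] = 0 := by
  simp [pvNet, pv_count_single]

theorem pv_net_cons (c : Char) (p : List Char) :
    pvNet (c :: p) = pvDelta c + pvNet p := by
  simp only [pvNet, pv_count_single, List.count_cons, pvDelta, beq_iff_eq]
  by_cases h1 : c = '[' <;> by_cases h2 : c = ']' <;> simp [h1, h2] <;> omega

-- reference single-character splitter (Python str.split('.'))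
def pvSplit (d : Char) : List Char → List (List Char)
  | [] => [[]]
  | c :: cs => if c = d then [] :: pvSplit d cs else (pvSplit d cs).modifyHead (c :: ·)

theorem pvSplit_ne_nil (d : Char) (cs : List Char) : pvSplit d cs ≠ [] := by
  cases cs with
  | nil => simp [pvSplit]
  | cons c cs =>
      simp only [pvSplit]
      split
      · simp
      · cases h : pvSplit d cs with
        | nil => exact absurd h (pvSplit_ne_nil d cs)
        | cons a l => simp

theorem pv_modifyHead_idfun {α : Type} (l : List α) : l.modifyHead (fun x => x) = l := by
  cases l <;> simp [List.modifyHead]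

theorem pv_splitOn_go (d : Char) : ∀ (cs cur : List Char) (acc : List (List Char)),
    PySem.Chars.splitOn.go [d] (cs.length + 1) cs cur acc =
      acc.reverse ++ (pvSplit d cs).modifyHead (cur.reverse ++ ·) := by
  intro cs
  induction cs with
  | nil => intro cur acc; simp [PySem.Chars.splitOn.go, pvSplit]
  | cons c cs ih =>
      intro cur acc
      simp only [List.length_cons, PySem.Chars.splitOn.go, List.isPrefixOf, List.length_nil,
        Bool.and_true, List.drop_succ_cons, List.drop_zero]
      by_cases hc : d = c
      · subst hc
        simp only [beq_self_eq_true, ite_true, ih, List.reverse_cons, List.reverse_nil,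
          List.nil_append]
        have hid : (pvSplit d cs).modifyHead (fun x => x) = pvSplit d cs := pv_modifyHead_idfun _
        rw [hid]
        have hsp : pvSplit d (d :: cs) = [] :: pvSplit d cs := by simp [pvSplit]
        rw [hsp]
        cases pvSplit d cs <;> simp [List.modifyHead]
      · have hcd : ¬ (c = d) := fun h => hc h.symm
        simp only [beq_iff_eq, hc, ite_false, ih, List.reverse_cons]
        have hsp : pvSplit d (c :: cs) = (pvSplit d cs).modifyHead (c :: ·) := by
          simp [pvSplit, hcd]
        rw [hsp]
        cases h : pvSplit d cs with
        | nil => exact absurd h (pvSplit_ne_nil d cs)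
        | cons a l => simp [List.modifyHead]

theorem pv_splitOn_eq (cs : List Char) (d : Char) :
    PySem.Chars.splitOn cs [d] = pvSplit d cs := by
  have h := pv_splitOn_go d cs [] []
  simpa [PySem.Chars.splitOn, pv_modifyHead_idfun] using h

-- A's loop, restructured over the pieces of the split (proof-only helper)
def pvRun : List (List Char) → List String → List Char → Int → List String
  | [], parts, cur, _ => pvEmit parts cur
  | [p], parts, cur, _ => pvEmit parts (cur ++ p)
  | p :: q :: r, parts, cur, dep =>
      let cur' := cur ++ p
      let dep' := dep + pvNet p
      if dep' = 0 then pvRun (q :: r) (pvEmit parts cur') [] 0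
      else pvRun (q :: r) parts (cur' ++ ['.']) dep'

theorem pvRun_modifyHead (c : Char) (ps : List (List Char)) (hps : ps ≠ [])
    (parts : List String) (cur : List Char) (dep : Int) :
    pvRun (ps.modifyHead (c :: ·)) parts cur dep = pvRun ps parts (cur ++ [c]) (dep + pvDelta c) := by
  match ps with
  | [] => exact absurd rfl hps
  | [p] => simp [List.modifyHead, pvRun]
  | p :: q :: r =>
      simp only [List.modifyHead, pvRun, pv_net_cons]
      have h1 : cur ++ c :: p = (cur ++ [c]) ++ p := by simp
      have h2 : dep + (pvDelta c + pvNet p) = dep + pvDelta c + pvNet p := by ring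
      rw [h1, h2]

theorem pvStepA_of_ne_dot (c : Char) (hc : c ≠ '.') (parts : List String) (cur : List Char)
    (dep : Int) : pvStepA (parts, cur, dep) c = (parts, cur ++ [c], dep + pvDelta c) := by
  simp only [pvStepA, pvDelta]
  by_cases h1 : c = '['
  · simp [h1]
  · by_cases h2 : c = ']'
    · simp [h2]; ring
    · simp [h1, h2, hc]

-- L1: A's character fold equals pvRun on the split pieces
theorem pvA_eq_pvRun : ∀ (cs : List Char) (parts : List String) (cur : List Char) (dep : Int),
    (match cs.foldl pvStepA (parts, cur, dep) with
     | (parts', cur', _) => pvEmit parts' cur') = pvRun (pvSplit '.' cs) parts cur dep := by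
  intro cs
  induction cs with
  | nil => intro parts cur dep; simp [pvSplit, pvRun]
  | cons c cs ih =>
      intro parts cur dep
      rw [List.foldl_cons]
      by_cases hc : c = '.'
      · subst hc
        obtain ⟨q, r, hqr⟩ : ∃ q r, pvSplit '.' cs = q :: r := by
          cases h : pvSplit '.' cs with
          | nil => exact absurd h (pvSplit_ne_nil _ _)
          | cons a l => exact ⟨a, l, rfl⟩
        have hsp : pvSplit '.' ('.' :: cs) = [] :: q :: r := by simp [pvSplit, hqr]
        rw [hsp]
        by_cases hd : dep = 0
        · subst hd
          have hA : pvStepA (parts, cur, 0) '.' = (pvEmit parts cur, [], 0) := by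
            simp [pvStepA]
          rw [hA, ih]
          simp [pvRun, pv_net_nil, hqr]
        · have hA : pvStepA (parts, cur, dep) '.' = (parts, cur ++ ['.'], dep) := by
            simp [pvStepA, hd]
          rw [hA, ih]
          simp [pvRun, pv_net_nil, hd, hqr]
      · rw [pvStepA_of_ne_dot c hc, ih]
        have hsp : pvSplit '.' (c :: cs) = (pvSplit '.' cs).modifyHead (c :: ·) := by
          simp [pvSplit, hc]
        rw [hsp, pvRun_modifyHead c _ (pvSplit_ne_nil _ _)]

-- one-step characterization of pvStepB
theorem pvStepB_eq (parts : List String) (buffer : List Char) (bal : Int) (p : List Char) :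
    pvStepB (parts, buffer, bal) p =
      if bal + pvNet p = 0 then
        (pvEmit parts (if buffer ≠ [] then buffer ++ ['.'] ++ p else p), [], 0)
      else (parts, (if buffer ≠ [] then buffer ++ ['.'] ++ p else p), bal + pvNet p) := rfl

-- L2: pvRun equals B's piece fold
theorem pvRun_eq_pvB : ∀ (ps : List (List Char)) (parts : List String) (buffer : List Char) (bal : Int),
    ps ≠ [] → (buffer = [] ↔ bal = 0) →
    pvRun ps parts (if buffer = [] then [] else buffer ++ ['.']) bal =
      (match ps.foldl pvStepB (parts, buffer, bal) with
       | (parts', buf', _) => pvEmit parts' buf') := by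
  intro ps
  induction ps with
  | nil => intro _ _ _ h _; exact absurd rfl h
  | cons p rest ih =>
      intro parts buffer bal _ hiff
      have hbuf : (if buffer = [] then ([] : List Char) else buffer ++ ['.']) ++ p =
          if buffer ≠ [] then buffer ++ ['.'] ++ p else p := by
        by_cases hb : buffer = [] <;> simp [hb]
      rw [List.foldl_cons, pvStepB_eq]
      cases rest with
      | nil =>
          rw [List.foldl_nil]
          by_cases h0 : bal + pvNet p = 0
          · rw [if_pos h0]
            show pvEmit parts ((if buffer = [] then [] else buffer ++ ['.']) ++ p) = _
            rw [hbuf]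
            simp [pvEmit]
          · rw [if_neg h0]
            show pvEmit parts ((if buffer = [] then [] else buffer ++ ['.']) ++ p) = _
            rw [hbuf]
      | cons q r =>
          by_cases h0 : bal + pvNet p = 0
          · rw [if_pos h0]
            show pvRun (p :: q :: r) parts (if buffer = [] then [] else buffer ++ ['.']) bal = _
            simp only [pvRun]
            rw [hbuf, if_pos h0]
            have h' := ih (pvEmit parts (if buffer ≠ [] then buffer ++ ['.'] ++ p else p)) [] 0
              (by simp) (by simp)
            rw [if_pos rfl] at h'
            exact h'
          · rw [if_neg h0]
            have hne : (if buffer ≠ [] then buffer ++ ['.'] ++ p else p) ≠ [] := by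
              by_cases hb : buffer = []
              · simp only [hb, ne_eq, not_true_eq_false, ite_false]
                intro hp
                rw [hiff.mp hb, hp, pv_net_nil] at h0
                exact h0 (by ring)
              · simp [hb]
            show pvRun (p :: q :: r) parts (if buffer = [] then [] else buffer ++ ['.']) bal = _
            simp only [pvRun]
            rw [hbuf, if_neg h0]
            have h' := ih parts (if buffer ≠ [] then buffer ++ ['.'] ++ p else p) (bal + pvNet p)
              (by simp)
              (by constructor <;> intro h <;> [exact absurd h hne; exact absurd h h0])
            rw [if_neg hne] at h'
            exact h'

-- ===== VERDICT (by name: the statement is the Claim_ definition above) =====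
theorem split_key_path_spec : Claim_equal_split_key_path := by
  intro key_path _
  unfold Spec_split_key_path split_key_path split_key_path_alt
  rw [pvA_eq_pvRun, pv_splitOn_eq]
  have := pvRun_eq_pvB (pvSplit '.' key_path.toList) [] [] 0 (pvSplit_ne_nil _ _) (by simp)
  simpa using this
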